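-- pv_equiv track=rewrite | github.com/MovEaxEsp/bdeformat | pythonx/parseutil.py | findSkippingGroups
-- ===== SOURCE A (Python) =====
-- def findNextOccurrence(line, pos, chars, direction):
--     """
--     Find the position in 'line' of the next occurrence (if 'direction' is
--     '1') or previous occurrence (if 'direction' is '-1) of any of the
--     specified 'chars' starting at the specified 'pos'.  Return -1 if none is
--     found
--     """
--
--     if pos < len(line):
--         end = -1 if direction < 0 else len(line)
--         for i in range(pos, end, direction):
--             for c in chars:
--                 if line[i] == c:
--                     return i
--
--     return -1
--
-- def findSkippingGroups(line, pos, chars, direction):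
--     """
--     Find the first of the specified 'chars', searching forwards (if 'direction'
--     is '1') or backwards (if 'direction' is '-1') from position 'pos'
--     in the specified 'line', skipping sections surrounded by (), <>, or [].
--     Return its position, or -1 if not found
--     """
--
--     toFind = ""
--     groupMap = ""
--     if direction > 0:
--         toFind = "(<[{" + chars
--         groupMap = {"(" : ")", "<" : ">", "[" : "]", "{" : "}"}
--     else:
--         toFind = ")>]}" + chars
--         groupMap = {")" : "(", ">" : "<", "]" : "[", "}" : "{"}
--
--     while True:
--         pos = findNextOccurrence(line, pos, toFind, direction)
--
--         # Can't find the character or a group character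
--         if pos == -1:
--             return -1
--
--         #If we found a '>', see if it's actually '->', and shouldn't be
--         #treated as the close of a group
--         if pos > 0 and line[pos] == '>' and line[pos-1] == '-':
--             # Skip this character.
--             pos += direction
--         elif line[pos] in chars:
--             # Found one of the characters we're looking for
--             return pos
--         else:
--             break
--
--     # We found an opening or closing character for a group.  Recursively call
--     # this function to skip over the group, and look for our character again
--     groupChar = groupMap[line[pos]]
--
--     pos += direction
--
--     pos = findSkippingGroups(line, pos, groupChar, direction)
--     if pos == -1:
--         # No corresponding group character
--         return -1
--
--     return findSkippingGroups(line, pos + direction, chars, direction)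
-- ===== SOURCE B (Python) =====
-- def findSkippingGroups(line, pos, chars, direction):
--     """
--     Single pass: walk the indices of range(pos, end, direction) one by one,
--     keeping an explicit stack of expected group-closing characters.
--     """
--     if direction > 0:
--         openers = "(<[{"
--         groupMap = {"(": ")", "<": ">", "[": "]", "{": "}"}
--     else:
--         openers = ")>]}"
--         groupMap = {")": "(", ">": "<", "]": "[", "}": "{"}
--
--     if pos < len(line):
--         end = len(line) if direction > 0 else -1
--         stack = []
--         for i in range(pos, end, direction):
--             ch = line[i]
--             if ch in openers or (stack and ch == stack[-1]) or (not stack and ch in chars):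
--                 if i > 0 and ch == '>' and line[i - 1] == '-':
--                     continue
--                 if not stack and ch in chars:
--                     return i
--                 if stack and ch == stack[-1]:
--                     stack.pop()
--                 else:
--                     stack.append(groupMap[ch])
--     return -1
-- ===== Notes on version B (the rewrite author's own statement) =====
-- stated objective: alternative
-- what changed: A repeatedly calls findNextOccurrence and recurses twice to skip each bracketed group; B is one character-by-character pass over range(pos, end, direction) with an explicit stack of expected closing characters - no occurrence-search helper and no recursion.
-- outside the precondition, e.g. on findSkippingGroups('az()', -2, 'a', 1): A returns -1, B returns 0
import Mathlib
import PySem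

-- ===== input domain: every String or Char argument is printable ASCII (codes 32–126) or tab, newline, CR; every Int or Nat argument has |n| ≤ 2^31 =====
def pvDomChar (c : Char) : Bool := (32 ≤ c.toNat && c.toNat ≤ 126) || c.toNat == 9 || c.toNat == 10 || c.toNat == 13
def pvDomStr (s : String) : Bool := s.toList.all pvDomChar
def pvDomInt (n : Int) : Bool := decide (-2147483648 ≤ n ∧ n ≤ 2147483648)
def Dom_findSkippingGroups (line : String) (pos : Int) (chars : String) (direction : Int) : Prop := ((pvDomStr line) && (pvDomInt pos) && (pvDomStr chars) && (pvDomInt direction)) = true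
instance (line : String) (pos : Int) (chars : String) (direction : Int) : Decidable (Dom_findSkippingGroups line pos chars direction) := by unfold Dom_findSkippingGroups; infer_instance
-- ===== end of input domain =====

-- B replaces A's recursion over repeated findNextOccurrence searches by ONE pass over
-- the index list range(pos, end, direction) with an explicit stack of expected closing
-- characters; they agree on every input of Pre_ (A's negative-start-forward corner and
-- its raising inputs are excluded there, see the comment at Pre_).

-- ===== PORT A =====

-- module helper findNextOccurrence: line[i] is PySem.List.pyGet?; a `none` there is a
-- Python IndexError (it happens only for direction > 0 with pos < -len, excluded by
-- Pre_); the port skips such an index, which matters only outside Pre_.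
def findNextOccurrence (line : List Char) (pos : Int) (chars : List Char) (direction : Int) : Int :=
  if pos < (line.length : Int) then
    let endv : Int := if direction < 0 then -1 else (line.length : Int)
    match (PySem.List.pyRange pos endv direction).find?
        (fun i => match PySem.List.pyGet? line i with
                  | some ch => chars.contains ch
                  | none => false) with
    | some i => i
    | none => -1
  else -1

-- A's dict literal groupMap; the lookup groupMap[line[pos]] never raises KeyError
-- (the looked-up char is always one of the four group chars of the direction),
-- so it is ported as a plain function (default: the char itself, unreachable).
def pvGroupMap (direction : Int) (c : Char) : Char :=
  if direction > 0 then
    match c with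
    | '(' => ')' | '<' => '>' | '[' => ']' | '{' => '}' | _ => c
  else
    match c with
    | ')' => '(' | '>' => '<' | ']' => '[' | '}' => '{' | _ => c

def pvOpens (direction : Int) : List Char :=
  if direction > 0 then "(<[{".toList else ")>]}".toList

-- A's body: the `while True` loop and the two recursive calls, as one fuel-indexed
-- recursion.  Fuel is threaded linearly (each loop iteration / call consumes one unit,
-- the leftover is returned) purely as a totality device; `none` = fuel exhausted
-- (never reached with the fuel findSkippingGroups supplies: see pvSA_fuel below).
-- `min f f'` is a termination guard only: goA_fuel_lt below shows f' < f, so it is f'.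
def goA (line : List Char) (direction : Int) : Nat → Int → List Char → Option (Int × Nat)
  | 0, _, _ => none
  | f + 1, pos, chars =>
    let r := findNextOccurrence line pos (pvOpens direction ++ chars) direction
    if r = -1 then some (-1, f)
    else
      let ch := (PySem.List.pyGet? line r).getD ' '
      if r > 0 ∧ ch = '>' ∧ (PySem.List.pyGet? line (r - 1)).getD ' ' = '-' then
        goA line direction f (r + direction) chars
      else if chars.contains ch then some (r, f)
      else
        match goA line direction f (r + direction) [pvGroupMap direction ch] with
        | none => none
        | some (q, f') =>
          if q = -1 then some (-1, f')
          else goA line direction (min f f') (q + direction) chars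

def pvFuel (line : String) (pos : Int) : Nat := line.length + pos.natAbs + 4

def findSkippingGroups (line : String) (pos : Int) (chars : String) (direction : Int) : Int :=
  match goA line.toList direction (pvFuel line pos) pos chars.toList with
  | some (r, _) => r
  | none => -1

-- ===== PORT B =====

-- B's for-loop body: structural recursion over the index list, `stack` holds the
-- expected closing characters (top = head).  line[i] is pyGet?; `none` (a Python
-- IndexError, only outside Pre_) is skipped, same convention as port A's helper.
def goW (line : List Char) (chars : List Char) (openers : List Char)
    (gmap : PySem.Dict Char Char) : List Int → List Char → Int
  | [], _ => -1
  | i :: rest, stack =>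
    match PySem.List.pyGet? line i with
    | none => goW line chars openers gmap rest stack
    | some ch =>
      if openers.contains ch || (match stack with
          | c :: _ => ch == c
          | [] => chars.contains ch) then
        if 0 < i ∧ ch = '>' ∧ (PySem.List.pyGet? line (i - 1)).getD ' ' = '-' then
          goW line chars openers gmap rest stack
        else
          match stack with
          | [] =>
            if chars.contains ch then i
            else goW line chars openers gmap rest [(PySem.Dict.get? gmap ch).getD ch]
          | c :: s =>
            if ch = c then goW line chars openers gmap rest s
            else goW line chars openers gmap rest ((PySem.Dict.get? gmap ch).getD ch :: c :: s)
      else goW line chars openers gmap rest stack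

def findSkippingGroups_alt (line : String) (pos : Int) (chars : String) (direction : Int) : Int :=
  let openers : List Char := if 0 < direction then "(<[{".toList else ")>]}".toList
  let gmap : PySem.Dict Char Char :=
    if 0 < direction then PySem.Dict.ofList [('(', ')'), ('<', '>'), ('[', ']'), ('{', '}')]
    else PySem.Dict.ofList [(')', '('), ('>', '<'), (']', '['), ('}', '{')]
  if pos < (line.toList.length : Int) then
    let endv : Int := if 0 < direction then (line.toList.length : Int) else -1
    goW line.toList chars.toList openers gmap (PySem.List.pyRange pos endv direction) []
  else -1

-- ===== PRECONDITION & SPEC =====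
-- Pre_ excludes (a) the inputs where the Python A raises: direction = 0 with
-- pos < len (ValueError from range(step=0)) and, inside (b), pos < -len with
-- direction > 0 (IndexError from line[pos]); and (b) forward searches from a negative
-- position (direction > 0, pos < 0), where Python's negative-index wraparound makes A
-- scan the tail of the line and read a match at index -1 as its not-found sentinel,
-- an accidental value no walker shares (e.g. line="az()", pos=-2, chars="a",
-- direction=1: A returns -1, B returns 0).
def Pre_findSkippingGroups (line : String) (pos : Int) (chars : String) (direction : Int) : Prop :=
  (0 < direction → 0 ≤ pos) ∧ (direction = 0 → (PySem.Str.len line : Int) ≤ pos)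
instance (line : String) (pos : Int) (chars : String) (direction : Int) : Decidable (Pre_findSkippingGroups line pos chars direction) := by unfold Pre_findSkippingGroups; infer_instance

def pvWitness_findSkippingGroups : String × Int × String × Int := ("a(b)c|d", 0, "|", 1)

def Spec_findSkippingGroups (line : String) (pos : Int) (chars : String) (direction : Int) (out : Int) : Prop := out = findSkippingGroups_alt line pos chars direction
instance (line : String) (pos : Int) (chars : String) (direction : Int) (out : Int) : Decidable (Spec_findSkippingGroups line pos chars direction out) := by unfold Spec_findSkippingGroups; infer_instance

-- ===== CLAIM (what is proved, stated in full; the proofs are below) =====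
def Claim_equal_findSkippingGroups : Prop := ∀ (line : String) (pos : Int) (chars : String) (direction : Int), Dom_findSkippingGroups line pos chars direction → Pre_findSkippingGroups line pos chars direction → Spec_findSkippingGroups line pos chars direction (findSkippingGroups line pos chars direction)

-- ===== LEMMAS AND PROOFS =====

-- ---- general pyRange facts for an arbitrary step (PySem only has step ±1 forms) ----

theorem pvRange_nil_pos {a b s : Int} (hs : 0 < s) (h : b ≤ a) :
    PySem.List.pyRange a b s = [] := by
  simp [PySem.List.pyRange, hs.ne', not_lt.mpr h, hs]

theorem pvRange_nil_neg {a b s : Int} (hs : s < 0) (h : a ≤ b) :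
    PySem.List.pyRange a b s = [] := by
  simp [PySem.List.pyRange, hs.ne, not_lt.mpr h, not_lt.mpr hs.le]

theorem pvRange_cons_pos {a b s : Int} (hs : 0 < s) (h : a < b) :
    PySem.List.pyRange a b s = a :: PySem.List.pyRange (a + s) b s := by
  have hsne : s ≠ 0 := hs.ne'
  have key : (if a < b then ((b - a + s - 1) / s).toNat else 0) =
      (if a + s < b then ((b - (a + s) + s - 1) / s).toNat else 0) + 1 := by
    rw [if_pos h]
    by_cases h2 : a + s < b
    · rw [if_pos h2]
      have h1 : (b - a + s - 1) / s = (b - (a + s) + s - 1) / s + 1 := by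
        have e : b - a + s - 1 = (b - (a + s) + s - 1) + 1 * s := by ring
        rw [e, Int.add_mul_ediv_right _ _ hsne]
      have h3 : 0 ≤ (b - (a + s) + s - 1) / s := Int.ediv_nonneg (by omega) hs.le
      omega
    · rw [if_neg h2]
      have hle : 1 ≤ (b - a + s - 1) / s := by
        rw [Int.le_ediv_iff_mul_le hs]; omega
      have hlt : (b - a + s - 1) / s < 2 := by
        rw [Int.ediv_lt_iff_lt_mul hs]; omega
      omega
  simp only [PySem.List.pyRange, if_neg hsne, if_pos hs]
  rw [key, List.range_succ_eq_map, List.map_cons, List.map_map]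
  congr 1
  · simp
  · apply List.map_congr_left
    intro k _
    simp only [Function.comp_apply, Nat.succ_eq_add_one]
    push_cast
    ring

theorem pvRange_cons_neg {a b s : Int} (hs : s < 0) (h : b < a) :
    PySem.List.pyRange a b s = a :: PySem.List.pyRange (a + s) b s := by
  have hsne : s ≠ 0 := hs.ne
  have hns : 0 < -s := by omega
  have key : (if b < a then ((a - b + -s - 1) / -s).toNat else 0) =
      (if b < a + s then ((a + s - b + -s - 1) / -s).toNat else 0) + 1 := by
    rw [if_pos h]
    by_cases h2 : b < a + s
    · rw [if_pos h2]
      have h1 : (a - b + -s - 1) / -s = (a + s - b + -s - 1) / -s + 1 := by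
        have e : a - b + -s - 1 = (a + s - b + -s - 1) + 1 * -s := by ring
        rw [e, Int.add_mul_ediv_right _ _ (by omega : (-s) ≠ 0)]
      have h3 : 0 ≤ (a + s - b + -s - 1) / -s := Int.ediv_nonneg (by omega) hns.le
      omega
    · rw [if_neg h2]
      have hle : 1 ≤ (a - b + -s - 1) / -s := by
        rw [Int.le_ediv_iff_mul_le hns]; omega
      have hlt : (a - b + -s - 1) / -s < 2 := by
        rw [Int.ediv_lt_iff_lt_mul hns]; omega
      omega
  simp only [PySem.List.pyRange, if_neg hsne, if_neg (by omega : ¬ 0 < s)]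
  rw [key, List.range_succ_eq_map, List.map_cons, List.map_map]
  congr 1
  · simp
  · apply List.map_congr_left
    intro k _
    simp only [Function.comp_apply, Nat.succ_eq_add_one]
    push_cast
    ring

theorem pvRange_cons_inv {a b s x : Int} {t : List Int} (hs : s ≠ 0)
    (h : PySem.List.pyRange a b s = x :: t) :
    x = a ∧ t = PySem.List.pyRange (a + s) b s := by
  rcases lt_or_gt_of_ne hs with hneg | hpos
  · by_cases hab : b < a
    · rw [pvRange_cons_neg hneg hab] at h
      exact ⟨(List.cons.injEq _ _ _ _ ▸ h).1.symm, (List.cons.injEq _ _ _ _ ▸ h).2.symm⟩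
    · rw [pvRange_nil_neg hneg (not_lt.mp hab)] at h; cases h
  · by_cases hab : a < b
    · rw [pvRange_cons_pos hpos hab] at h
      exact ⟨(List.cons.injEq _ _ _ _ ▸ h).1.symm, (List.cons.injEq _ _ _ _ ▸ h).2.symm⟩
    · rw [pvRange_nil_pos hpos (not_lt.mp hab)] at h; cases h

theorem pvRange_suffix {b s : Int} (hs : s ≠ 0) :
    ∀ (L1 : List Int) (a r : Int) (L2 : List Int),
      PySem.List.pyRange a b s = L1 ++ r :: L2 → L2 = PySem.List.pyRange (r + s) b s := by
  intro L1
  induction L1 with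
  | nil =>
    intro a r L2 h
    obtain ⟨hx, ht⟩ := pvRange_cons_inv hs h
    rw [ht, hx]
  | cons x L1 ih =>
    intro a r L2 h
    obtain ⟨-, ht⟩ := pvRange_cons_inv hs h
    exact ih (a + s) r L2 ht.symm

theorem pvMem_decomp {b s : Int} (hs : s ≠ 0) {a x : Int}
    (hx : x ∈ PySem.List.pyRange a b s) :
    ∃ L1, PySem.List.pyRange a b s = L1 ++ x :: PySem.List.pyRange (x + s) b s := by
  obtain ⟨L1, L2, h⟩ := List.append_of_mem hx
  exact ⟨L1, by rw [h, pvRange_suffix hs L1 a x L2 h]⟩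

theorem pvMem_step_len {b s : Int} (hs : s ≠ 0) {a x : Int}
    (hx : x ∈ PySem.List.pyRange a b s) :
    (PySem.List.pyRange (x + s) b s).length < (PySem.List.pyRange a b s).length := by
  obtain ⟨L1, h⟩ := pvMem_decomp hs hx
  rw [h]; simp; omega

theorem pvMem_step_mem {b s : Int} (hs : s ≠ 0) {a x y : Int}
    (hx : x ∈ PySem.List.pyRange a b s)
    (hy : y ∈ PySem.List.pyRange (x + s) b s) :
    y ∈ PySem.List.pyRange a b s := by
  obtain ⟨L1, h⟩ := pvMem_decomp hs hx
  rw [h]; exact List.mem_append_right _ (List.mem_cons_of_mem _ hy)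

theorem pvMem_ge_pos {a b s x : Int} (hs : 0 < s) (hx : x ∈ PySem.List.pyRange a b s) :
    a ≤ x := by
  simp only [PySem.List.pyRange, if_neg hs.ne', if_pos hs, List.mem_map, List.mem_range] at hx
  obtain ⟨k, -, rfl⟩ := hx
  have : 0 ≤ s * (k : Int) := mul_nonneg hs.le (by positivity)
  omega

theorem pvMem_le_neg {a b s x : Int} (hs : s < 0) (hx : x ∈ PySem.List.pyRange a b s) :
    x ≤ a := by
  simp only [PySem.List.pyRange, if_neg hs.ne, if_neg (by omega : ¬ 0 < s), List.mem_map,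
    List.mem_range] at hx
  obtain ⟨k, -, rfl⟩ := hx
  have : s * (k : Int) ≤ 0 := mul_nonpos_of_nonpos_of_nonneg hs.le (by positivity)
  omega

theorem pvMem_gt_stop_neg {a b s x : Int} (hs : s < 0) (hx : x ∈ PySem.List.pyRange a b s) :
    b < x := by
  simp only [PySem.List.pyRange, if_neg hs.ne, if_neg (by omega : ¬ 0 < s), List.mem_map,
    List.mem_range] at hx
  obtain ⟨k, hk, rfl⟩ := hx
  by_cases hab : b < a
  · rw [if_pos hab] at hk
    have hns : (0:Int) < -s := by omega
    set N : Int := (a - b + -s - 1) / -s with hN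
    have hkN : (k : Int) ≤ N - 1 := by
      have : (k : Int) < (N.toNat : Int) := by exact_mod_cast hk
      have hN0 : 0 ≤ N := Int.ediv_nonneg (by omega) hns.le
      omega
    have hmul : -s * (k : Int) ≤ -s * (N - 1) :=
      mul_le_mul_of_nonneg_left hkN hns.le
    have hdiv : -s * N ≤ a - b + -s - 1 := by
      rw [hN]
      have := Int.mul_ediv_add_emod (a - b + -s - 1) (-s)
      have := Int.emod_nonneg (a - b + -s - 1) (by omega : -s ≠ 0)
      omega
    nlinarith
  · rw [if_neg hab] at hk; omega

theorem pvLen_le {a b s : Int} :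
    (PySem.List.pyRange a b s).length ≤ (if 0 < s then (b - a).toNat else (a - b).toNat) + 1 := by
  by_cases hs0 : s = 0
  · simp [PySem.List.pyRange, hs0]
  rcases lt_or_gt_of_ne hs0 with hneg | hpos
  · simp only [PySem.List.pyRange, if_neg hs0, if_neg (by omega : ¬ 0 < s), List.length_map,
      List.length_range]
    by_cases hab : b < a
    · rw [if_pos hab]
      have hns : (0:Int) < -s := by omega
      have h1 : (a - b + -s - 1) / -s = (a - b - 1) / -s + 1 := by
        have e : a - b + -s - 1 = (a - b - 1) + 1 * -s := by ring
        rw [e, Int.add_mul_ediv_right _ _ (by omega : (-s) ≠ 0)]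
      have h2 : (a - b - 1) / -s ≤ a - b - 1 := Int.ediv_le_self _ (by omega)
      have h3 : 0 ≤ (a - b - 1) / -s := Int.ediv_nonneg (by omega) hns.le
      omega
    · rw [if_neg hab]; omega
  · simp only [PySem.List.pyRange, if_neg hs0, if_pos hpos, List.length_map, List.length_range]
    by_cases hab : a < b
    · rw [if_pos hab]
      have h1 : (b - a + s - 1) / s = (b - a - 1) / s + 1 := by
        have e : b - a + s - 1 = (b - a - 1) + 1 * s := by ring
        rw [e, Int.add_mul_ediv_right _ _ hs0]
      have h2 : (b - a - 1) / s ≤ b - a - 1 := Int.ediv_le_self _ (by omega)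
      have h3 : 0 ≤ (b - a - 1) / s := Int.ediv_nonneg (by omega) hpos.le
      omega
    · rw [if_neg hab]; omega

-- ---- A's continuation semantics with an explicit stack of pending one-char searches ----
-- pvSA f pos [] runs A on `chars`; pvSA f pos (c :: st) runs A on the one-char search [c]
-- and, on success, resumes the pending stack with the leftover fuel.
def pvSA (line : List Char) (direction : Int) (chars : List Char)
    (f : Nat) (pos : Int) : List Char → Option (Int × Nat)
  | [] => goA line direction f pos chars
  | c :: st =>
    match goA line direction f pos [c] with
    | none => none
    | some (q, f') =>
      if q = -1 then some (-1, f')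
      else pvSA line direction chars f' (q + direction) st

-- the leftover fuel goA returns is strictly below the fuel it was given
theorem goA_fuel_lt (line : List Char) (direction : Int) :
    ∀ (f : Nat) (pos : Int) (chars : List Char) (q : Int) (f' : Nat),
      goA line direction f pos chars = some (q, f') → f' < f := by
  intro f
  induction f using Nat.strong_induction_on with
  | _ f ih =>
    cases f with
    | zero => intro pos chars q f' h; simp [goA] at h
    | succ f =>
      intro pos chars q f' h
      simp only [goA] at h
      split at h
      · simp only [Option.some.injEq, Prod.mk.injEq] at h; omega
      · split at h
        · exact Nat.lt_succ_of_lt (ih f (Nat.lt_succ_self f) _ _ _ _ h)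
        · split at h
          · simp only [Option.some.injEq, Prod.mk.injEq] at h; omega
          · split at h
            · exact absurd h (by simp)
            · rename_i q1 f1 heq
              have h1 : f1 < f := ih f (Nat.lt_succ_self f) _ _ _ _ heq
              split at h
              · simp only [Option.some.injEq, Prod.mk.injEq] at h; omega
              · have h2 := ih (min f f1) (by omega) _ _ _ _ h
                omega

-- ---- the search-set characterisation shared by the two ports ----
def pvSearch (d : Int) (chars : List Char) (st : List Char) : List Char :=
  pvOpens d ++ (match st with | [] => chars | c :: _ => [c])

def pvPred (line : List Char) (d : Int) (chars : List Char) (st : List Char) (i : Int) : Bool :=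
  match PySem.List.pyGet? line i with
  | some ch => (pvSearch d chars st).contains ch
  | none => false

-- goW skips every index whose char is not in the current search set
theorem goW_skip (line : List Char) (chars : List Char) (d : Int)
    (gmap : PySem.Dict Char Char) :
    ∀ (L1 L2 : List Int) (st : List Char),
      (∀ i ∈ L1, pvPred line d chars st i = false) →
      goW line chars (pvOpens d) gmap (L1 ++ L2) st =
        goW line chars (pvOpens d) gmap L2 st := by
  intro L1
  induction L1 with
  | nil => intro L2 st _; rfl
  | cons i L1 ih =>
    intro L2 st h
    have hi := h i (List.mem_cons_self ..)
    have hrest : ∀ j ∈ L1, pvPred line d chars st j = false :=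
      fun j hj => h j (List.mem_cons_of_mem _ hj)
    rw [List.cons_append]
    cases hget : PySem.List.pyGet? line i with
    | none => simp only [goW, hget]; exact ih L2 st hrest
    | some ch =>
      simp only [pvPred, hget] at hi
      cases st with
      | nil =>
        simp only [pvSearch, List.contains_append, Bool.or_eq_false_iff] at hi
        simp only [goW, hget, hi.1, hi.2, Bool.or_self, Bool.false_eq_true, if_false]
        exact ih L2 [] hrest
      | cons c s0 =>
        simp only [pvSearch, List.contains_append, Bool.or_eq_false_iff] at hi
        have hne : (ch == c) = false := by
          have h2 := hi.2
          refine beq_eq_false_iff_ne.mpr ?_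
          intro hcc; subst hcc; simp at h2
        simp only [goW, hget, hi.1, hne, Bool.or_self, Bool.false_eq_true, if_false]
        exact ih L2 (c :: s0) hrest

-- fuel-exhaustion bound (S) and found-position invariant (T), proved together
def pvE (line : List Char) (d : Int) : Int := if d < 0 then -1 else (line.length : Int)

def pvLen (line : List Char) (d pos : Int) : Nat :=
  (PySem.List.pyRange pos (pvE line d) d).length

-- a non-(-1) result of findNextOccurrence comes from a successful find? over the range
theorem pvFind_found {line : List Char} {pos : Int} {S : List Char} {d r : Int}
    (h : findNextOccurrence line pos S d = r) (hr : r ≠ -1) :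
    pos < (line.length : Int) ∧
    (PySem.List.pyRange pos (pvE line d) d).find?
      (fun i => match PySem.List.pyGet? line i with
                | some ch => S.contains ch
                | none => false) = some r := by
  simp only [findNextOccurrence] at h
  rw [show (if d < 0 then (-1:Int) else (line.length : Int)) = pvE line d from rfl] at h
  by_cases hp : pos < (line.length : Int)
  · rw [if_pos hp] at h
    refine ⟨hp, ?_⟩
    rcases hf : (PySem.List.pyRange pos (pvE line d) d).find?
        (fun i => match PySem.List.pyGet? line i with
                  | some ch => S.contains ch
                  | none => false) with _ | j
    · rw [hf] at h; exact absurd h.symm hr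
    · rw [hf] at h; exact congrArg some h
  · rw [if_neg hp] at h; exact absurd h.symm hr

theorem pvST (line : List Char) (d : Int) (hd : d ≠ 0) :
    ∀ (f : Nat) (pos : Int) (chars' : List Char),
      (goA line d f pos chars' = none → f ≤ pvLen line d pos) ∧
      (∀ q f1, goA line d f pos chars' = some (q, f1) → q ≠ -1 →
        q ∈ PySem.List.pyRange pos (pvE line d) d ∧
        f + pvLen line d (q + d) ≤ f1 + pvLen line d pos) := by
  intro f
  induction f using Nat.strong_induction_on with
  | _ f ih =>
    cases f with
    | zero =>
      intro pos chars'
      exact ⟨fun _ => Nat.zero_le _, fun q f1 h => by simp [goA] at h⟩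
    | succ g =>
      intro pos chars'
      by_cases h1 : findNextOccurrence line pos (pvOpens d ++ chars') d = -1
      · constructor
        · intro h; simp only [goA, h1, if_pos] at h; cases h
        · intro q f1 h hq
          simp only [goA, h1, if_pos] at h
          cases h; exact absurd rfl hq
      · -- found at r0
        obtain ⟨hp, hf⟩ := pvFind_found rfl h1
        set r0 := findNextOccurrence line pos (pvOpens d ++ chars') d with hr0
        have hmem : r0 ∈ PySem.List.pyRange pos (pvE line d) d :=
          List.mem_of_find?_eq_some hf
        have mlt : pvLen line d (r0 + d) < pvLen line d pos := pvMem_step_len hd hmem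
        by_cases hgd : r0 > 0 ∧ (PySem.List.pyGet? line r0).getD ' ' = '>' ∧
            (PySem.List.pyGet? line (r0 - 1)).getD ' ' = '-'
        · -- the '->' guard: one recursive step
          have hEq : goA line d (g + 1) pos chars' = goA line d g (r0 + d) chars' := by
            simp only [goA, ← hr0, if_neg h1, if_pos hgd]
          constructor
          · intro h; rw [hEq] at h
            have := (ih g (Nat.lt_succ_self g) (r0 + d) chars').1 h
            omega
          · intro q f1 h hq; rw [hEq] at h
            obtain ⟨hqm, har⟩ := (ih g (Nat.lt_succ_self g) (r0 + d) chars').2 q f1 h hq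
            exact ⟨pvMem_step_mem hd hmem hqm, by omega⟩
        · by_cases hc : chars'.contains ((PySem.List.pyGet? line r0).getD ' ')
          · -- found one of the target chars
            have hEq : goA line d (g + 1) pos chars' = some (r0, g) := by
              simp only [goA, ← hr0, if_neg h1, if_neg hgd, if_pos hc]
            constructor
            · intro h; rw [hEq] at h; cases h
            · intro q f1 h hq; rw [hEq] at h
              cases h
              exact ⟨hmem, by omega⟩
          · -- group character: skip the group, then continue
            rcases hgin : goA line d g (r0 + d)
                [pvGroupMap d ((PySem.List.pyGet? line r0).getD ' ')] with _ | ⟨q1, f1'⟩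
            · have hEq : goA line d (g + 1) pos chars' = none := by
                simp only [goA, ← hr0, if_neg h1, if_neg hgd, if_neg hc, hgin]
              constructor
              · intro _
                have := (ih g (Nat.lt_succ_self g) (r0 + d) _).1 hgin
                omega
              · intro q f1 h hq; rw [hEq] at h; cases h
            · have hf1 : f1' < g := goA_fuel_lt line d g _ _ _ _ hgin
              by_cases hq1 : q1 = -1
              · have hEq : goA line d (g + 1) pos chars' = some (-1, f1') := by
                  simp only [goA, ← hr0, if_neg h1, if_neg hgd, if_neg hc, hgin, if_pos hq1]
                constructor
                · intro h; rw [hEq] at h; cases h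
                · intro q f1 h hq; rw [hEq] at h; cases h; exact absurd rfl hq
              · obtain ⟨hq1m, hq1a⟩ :=
                  (ih g (Nat.lt_succ_self g) (r0 + d) _).2 q1 f1' hgin hq1
                have hmin : min g f1' = f1' := Nat.min_eq_right hf1.le
                have hEq : goA line d (g + 1) pos chars' =
                    goA line d f1' (q1 + d) chars' := by
                  simp only [goA, ← hr0, if_neg h1, if_neg hgd, if_neg hc, hgin,
                    if_neg hq1, hmin]
                constructor
                · intro h; rw [hEq] at h
                  have := (ih f1' (by omega) (q1 + d) chars').1 h
                  omega
                · intro q f1 h hq; rw [hEq] at h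
                  obtain ⟨hqm, hqa⟩ := (ih f1' (by omega) (q1 + d) chars').2 q f1 h hq
                  exact ⟨pvMem_step_mem hd hmem (pvMem_step_mem hd hq1m hqm), by omega⟩

-- when findNextOccurrence fails, the walker consumes its whole index list and fails too
theorem pvNotFound (line : List Char) (chars : List Char) (d : Int) (hd : d ≠ 0)
    (gmap : PySem.Dict Char Char) (pos : Int) (st : List Char)
    (hp1 : 0 < d → 0 ≤ pos) (hp2 : d < 0 → pos < (line.length : Int))
    (h : findNextOccurrence line pos (pvSearch d chars st) d = -1) :
    goW line chars (pvOpens d) gmap (PySem.List.pyRange pos (pvE line d) d) st = -1 := by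
  simp only [findNextOccurrence] at h
  rw [show (if d < 0 then (-1:Int) else (line.length : Int)) = pvE line d from rfl] at h
  by_cases hpos : pos < (line.length : Int)
  · rw [if_pos hpos] at h
    rcases hf : (PySem.List.pyRange pos (pvE line d) d).find?
        (fun i => match PySem.List.pyGet? line i with
                  | some ch => (pvSearch d chars st).contains ch
                  | none => false) with _ | j
    · rw [List.find?_eq_none] at hf
      have hall : ∀ i ∈ PySem.List.pyRange pos (pvE line d) d,
          pvPred line d chars st i = false := by
        intro i hi
        have := hf i hi
        simpa [pvPred] using this
      calc goW line chars (pvOpens d) gmap (PySem.List.pyRange pos (pvE line d) d) st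
          = goW line chars (pvOpens d) gmap
              (PySem.List.pyRange pos (pvE line d) d ++ []) st := by rw [List.append_nil]
        _ = goW line chars (pvOpens d) gmap [] st := goW_skip line chars d gmap _ [] st hall
        _ = -1 := rfl
    · exfalso
      rw [hf] at h
      have hj : j = -1 := h
      have hmem := List.mem_of_find?_eq_some hf
      rcases lt_or_gt_of_ne hd with hneg | hpos'
      · have := pvMem_gt_stop_neg hneg hmem
        simp only [pvE, if_pos hneg] at this; omega
      · have := pvMem_ge_pos hpos' hmem
        have := hp1 hpos'; omega
  · rw [if_neg hpos] at h
    have hdpos : 0 < d := by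
      rcases lt_or_gt_of_ne hd with hneg | hpos'
      · exact absurd (hp2 hneg) hpos
      · exact hpos'
    rw [show pvE line d = (line.length : Int) by simp [pvE]; omega]
    rw [pvRange_nil_pos hdpos (by omega)]
    rfl

-- the simulation: B's single pass with stack st computes A's continuation semantics
theorem pvMain (line : List Char) (chars : List Char) (d : Int) (hd : d ≠ 0)
    (gmap : PySem.Dict Char Char)
    (hg : ∀ ch, (pvOpens d).contains ch = true →
      (PySem.Dict.get? gmap ch).getD ch = pvGroupMap d ch) :
    ∀ (f : Nat) (pos : Int) (st : List Char) (r : Int) (f' : Nat),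
      (0 < d → 0 ≤ pos) → (d < 0 → pos < (line.length : Int)) →
      pvSA line d chars f pos st = some (r, f') →
      goW line chars (pvOpens d) gmap (PySem.List.pyRange pos (pvE line d) d) st = r := by
  intro f
  induction f using Nat.strong_induction_on with
  | _ f ih =>
    cases f with
    | zero =>
      intro pos st r f' _ _ hsa
      cases st <;> simp [pvSA, goA] at hsa
    | succ g =>
      intro pos st r f' hp1 hp2 hsa
      by_cases h1 : findNextOccurrence line pos (pvSearch d chars st) d = -1
      · -- not found: both sides give -1
        have hbw := pvNotFound line chars d hd gmap pos st hp1 hp2 h1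
        have hr : r = -1 := by
          cases st with
          | nil =>
            simp only [pvSA, goA] at hsa
            rw [show (pvOpens d ++ chars) = pvSearch d chars [] from rfl, h1] at hsa
            simp at hsa
            exact hsa.1.symm
          | cons c rest =>
            simp only [pvSA, goA] at hsa
            rw [show (pvOpens d ++ [c]) = pvSearch d chars (c :: rest) from rfl, h1] at hsa
            simp at hsa
            exact hsa.1.symm
        rw [hr]; exact hbw
      · -- found at r0
        obtain ⟨hpos, hf⟩ := pvFind_found rfl h1
        set r0 := findNextOccurrence line pos (pvSearch d chars st) d with hr0def
        obtain ⟨hpred, as, bs, hsplit, hfail⟩ := List.find?_eq_some_iff_append.mp hf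
        have hbs : bs = PySem.List.pyRange (r0 + d) (pvE line d) d :=
          pvRange_suffix hd as pos r0 bs hsplit
        have hmem : r0 ∈ PySem.List.pyRange pos (pvE line d) d :=
          List.mem_of_find?_eq_some hf
        rcases hget : PySem.List.pyGet? line r0 with _ | c
        · rw [hget] at hpred; simp at hpred
        · rw [hget] at hpred
          have hgetD : (PySem.List.pyGet? line r0).getD ' ' = c := by rw [hget]; rfl
          have hr0ne : r0 ≠ -1 := by
            rcases lt_or_gt_of_ne hd with hneg | hpos'
            · have := pvMem_gt_stop_neg hneg hmem
              simp only [pvE, if_pos hneg] at this; omega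
            · have := pvMem_ge_pos hpos' hmem
              have := hp1 hpos'; omega
          have hp1' : 0 < d → 0 ≤ r0 + d := by
            intro hdp
            have := pvMem_ge_pos hdp hmem
            have := hp1 hdp; omega
          have hp2' : d < 0 → r0 + d < (line.length : Int) := by
            intro hdn
            have := pvMem_le_neg hdn hmem
            have := hp2 hdn; omega
          have hskip : goW line chars (pvOpens d) gmap
              (PySem.List.pyRange pos (pvE line d) d) st =
              goW line chars (pvOpens d) gmap
                (r0 :: PySem.List.pyRange (r0 + d) (pvE line d) d) st := by
            rw [hsplit, hbs]
            exact goW_skip line chars d gmap as _ st (by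
              intro i hi
              have := hfail i hi
              simp only [Bool.not_eq_eq_eq_not, Bool.not_true] at this
              simpa [pvPred] using this)
          rw [hskip]
          cases st with
          | nil =>
            have hcnd : (((pvOpens d).contains c) || chars.contains c) = true := by
              simpa [pvSearch, List.contains_append] using hpred
            by_cases hgd : r0 > 0 ∧ c = '>' ∧ (PySem.List.pyGet? line (r0 - 1)).getD ' ' = '-'
            · -- the '->' guard: both sides skip this character, keeping the stack
              have hwstep : goW line chars (pvOpens d) gmap
                  (r0 :: PySem.List.pyRange (r0 + d) (pvE line d) d) [] =
                  goW line chars (pvOpens d) gmap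
                    (PySem.List.pyRange (r0 + d) (pvE line d) d) [] := by
                simp only [goW, hget, hcnd, if_true, if_pos (show (0 < r0 ∧ c = '>' ∧
                  (PySem.List.pyGet? line (r0 - 1)).getD ' ' = '-') from hgd)]
              rw [hwstep]
              have hEq : goA line d (g + 1) pos chars = goA line d g (r0 + d) chars := by
                simp only [goA]
                rw [show (pvOpens d ++ chars) = pvSearch d chars [] from rfl,
                  ← hr0def, if_neg h1, hgetD, if_pos hgd]
              have hsa' : pvSA line d chars g (r0 + d) [] = some (r, f') := by
                simpa only [pvSA, hEq] using hsa
              exact ih g (Nat.lt_succ_self g) (r0 + d) [] r f' hp1' hp2' hsa'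
            · by_cases hc : chars.contains c
              · -- found one of the target chars at top level: both return r0
                have hEq : goA line d (g + 1) pos chars = some (r0, g) := by
                  simp only [goA]
                  rw [show (pvOpens d ++ chars) = pvSearch d chars [] from rfl,
                    ← hr0def, if_neg h1, hgetD, if_neg hgd, if_pos hc]
                have hr : r = r0 := by
                  simp only [pvSA, hEq, Option.some.injEq, Prod.mk.injEq] at hsa
                  exact hsa.1.symm
                have hwret : goW line chars (pvOpens d) gmap
                    (r0 :: PySem.List.pyRange (r0 + d) (pvE line d) d) [] = r0 := by
                  simp only [goW, hget, hcnd, if_true, if_neg hgd, if_pos hc]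
                rw [hwret, hr]
              · -- group char at top level: walker pushes its closer; A recurses on it
                have hcf : chars.contains c = false := by
                  revert hc; cases chars.contains c <;> simp
                have hopen : (pvOpens d).contains c = true := by
                  rw [hcf, Bool.or_false] at hcnd; exact hcnd
                have hwstep : goW line chars (pvOpens d) gmap
                    (r0 :: PySem.List.pyRange (r0 + d) (pvE line d) d) [] =
                    goW line chars (pvOpens d) gmap
                      (PySem.List.pyRange (r0 + d) (pvE line d) d) [pvGroupMap d c] := by
                  simp only [goW, hget, hopen, Bool.true_or, if_true, if_neg hgd, hcf,
                    Bool.false_eq_true, if_false, hg c hopen]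
                rw [hwstep]
                have hEq : goA line d (g + 1) pos chars =
                    (match goA line d g (r0 + d) [pvGroupMap d c] with
                     | none => none
                     | some (q1, f1') =>
                       if q1 = -1 then some (-1, f1')
                       else goA line d (min g f1') (q1 + d) chars) := by
                  simp only [goA]
                  rw [show (pvOpens d ++ chars) = pvSearch d chars [] from rfl,
                    ← hr0def, if_neg h1, hgetD, if_neg hgd, if_neg hc]
                simp only [pvSA] at hsa
                rcases hgin : goA line d g (r0 + d) [pvGroupMap d c] with _ | ⟨q1, f1'⟩
                · rw [hEq, hgin] at hsa; cases hsa
                · have hEq2 : goA line d (g + 1) pos chars =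
                      (if q1 = -1 then some (-1, f1')
                       else goA line d (min g f1') (q1 + d) chars) := by
                    rw [hEq, hgin]
                  rw [hEq2] at hsa
                  by_cases hq1 : q1 = -1
                  · rw [if_pos hq1] at hsa
                    have hsa' : pvSA line d chars g (r0 + d) [pvGroupMap d c] =
                        some (r, f') := by
                      simp only [pvSA, hgin, if_pos hq1]
                      exact hsa
                    exact ih g (Nat.lt_succ_self g) (r0 + d) [pvGroupMap d c] r f'
                      hp1' hp2' hsa'
                  · rw [if_neg hq1] at hsa
                    have hmin : min g f1' = f1' :=
                      Nat.min_eq_right (goA_fuel_lt line d g _ _ _ _ hgin).le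
                    rw [hmin] at hsa
                    have hsa' : pvSA line d chars g (r0 + d) [pvGroupMap d c] =
                        some (r, f') := by
                      simp only [pvSA, hgin, if_neg hq1]
                      exact hsa
                    exact ih g (Nat.lt_succ_self g) (r0 + d) [pvGroupMap d c] r f'
                      hp1' hp2' hsa'
          | cons c0 rest =>
            have hcnd : (((pvOpens d).contains c) || (c == c0)) = true := by
              simpa [pvSearch, List.contains_append] using hpred
            by_cases hgd : r0 > 0 ∧ c = '>' ∧ (PySem.List.pyGet? line (r0 - 1)).getD ' ' = '-'
            · -- the '->' guard: both sides skip this character, keeping the stack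
              have hwstep : goW line chars (pvOpens d) gmap
                  (r0 :: PySem.List.pyRange (r0 + d) (pvE line d) d) (c0 :: rest) =
                  goW line chars (pvOpens d) gmap
                    (PySem.List.pyRange (r0 + d) (pvE line d) d) (c0 :: rest) := by
                simp only [goW, hget, hcnd, if_true, if_pos (show (0 < r0 ∧ c = '>' ∧
                  (PySem.List.pyGet? line (r0 - 1)).getD ' ' = '-') from hgd)]
              rw [hwstep]
              have hEq : goA line d (g + 1) pos [c0] = goA line d g (r0 + d) [c0] := by
                simp only [goA]
                rw [show (pvOpens d ++ [c0]) = pvSearch d chars (c0 :: rest) from rfl,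
                  ← hr0def, if_neg h1, hgetD, if_pos hgd]
              have hsa' : pvSA line d chars g (r0 + d) (c0 :: rest) = some (r, f') := by
                simpa only [pvSA, hEq] using hsa
              exact ih g (Nat.lt_succ_self g) (r0 + d) (c0 :: rest) r f' hp1' hp2' hsa'
            · by_cases hcc : c = c0
              · -- the expected closing char: walker pops; A's inner search succeeds
                have hc : ([c0].contains c) = true := by simp [hcc]
                have hEq : goA line d (g + 1) pos [c0] = some (r0, g) := by
                  simp only [goA]
                  rw [show (pvOpens d ++ [c0]) = pvSearch d chars (c0 :: rest) from rfl,
                    ← hr0def, if_neg h1, hgetD, if_neg hgd, if_pos hc]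
                have hsa' : pvSA line d chars g (r0 + d) rest = some (r, f') := by
                  simp only [pvSA, hEq] at hsa
                  rw [if_neg hr0ne] at hsa
                  exact hsa
                have hwstep : goW line chars (pvOpens d) gmap
                    (r0 :: PySem.List.pyRange (r0 + d) (pvE line d) d) (c0 :: rest) =
                    goW line chars (pvOpens d) gmap
                      (PySem.List.pyRange (r0 + d) (pvE line d) d) rest := by
                  simp only [goW, hget, hcnd, if_true, if_neg hgd, if_pos hcc]
                rw [hwstep]
                exact ih g (Nat.lt_succ_self g) (r0 + d) rest r f' hp1' hp2' hsa'
              · -- a nested opener: walker pushes; A recurses on its closer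
                have hc : ([c0].contains c) = false := by simp [hcc]
                have hopen : (pvOpens d).contains c = true := by
                  cases hoc : (pvOpens d).contains c
                  · rw [hoc] at hcnd; simp at hcnd; exact absurd hcnd hcc
                  · rfl
                have hwstep : goW line chars (pvOpens d) gmap
                    (r0 :: PySem.List.pyRange (r0 + d) (pvE line d) d) (c0 :: rest) =
                    goW line chars (pvOpens d) gmap
                      (PySem.List.pyRange (r0 + d) (pvE line d) d)
                      (pvGroupMap d c :: c0 :: rest) := by
                  simp only [goW, hget, hcnd, if_true, if_neg hgd, if_neg hcc, hg c hopen]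
                rw [hwstep]
                have hEq : goA line d (g + 1) pos [c0] =
                    (match goA line d g (r0 + d) [pvGroupMap d c] with
                     | none => none
                     | some (q1, f1') =>
                       if q1 = -1 then some (-1, f1')
                       else goA line d (min g f1') (q1 + d) [c0]) := by
                  simp only [goA]
                  rw [show (pvOpens d ++ [c0]) = pvSearch d chars (c0 :: rest) from rfl,
                    ← hr0def, if_neg h1, hgetD, if_neg hgd, if_neg (by simpa using hcc)]
                rcases hgin : goA line d g (r0 + d) [pvGroupMap d c] with _ | ⟨q1, f1'⟩
                · have hEq2 : goA line d (g + 1) pos [c0] = none := by rw [hEq, hgin]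
                  simp only [pvSA, hEq2] at hsa
                  cases hsa
                · have hEq2 : goA line d (g + 1) pos [c0] =
                      (if q1 = -1 then some (-1, f1')
                       else goA line d (min g f1') (q1 + d) [c0]) := by
                    rw [hEq, hgin]
                  by_cases hq1 : q1 = -1
                  · rw [if_pos hq1] at hEq2
                    have hrr : r = -1 ∧ f' = f1' := by
                      have hs2 : some ((-1 : Int), f1') = some (r, f') := by
                        simp only [pvSA, hEq2] at hsa
                        simpa using hsa
                      have h2 := Option.some.inj hs2
                      exact ⟨(congrArg Prod.fst h2).symm, (congrArg Prod.snd h2).symm⟩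
                    have hsa' : pvSA line d chars g (r0 + d)
                        (pvGroupMap d c :: c0 :: rest) = some (r, f') := by
                      simp only [pvSA, hgin, if_pos hq1, hrr.1, hrr.2]
                    exact ih g (Nat.lt_succ_self g) (r0 + d)
                      (pvGroupMap d c :: c0 :: rest) r f' hp1' hp2' hsa'
                  · rw [if_neg hq1] at hEq2
                    have hmin : min g f1' = f1' :=
                      Nat.min_eq_right (goA_fuel_lt line d g _ _ _ _ hgin).le
                    rw [hmin] at hEq2
                    have hsa' : pvSA line d chars g (r0 + d)
                        (pvGroupMap d c :: c0 :: rest) = some (r, f') := by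
                      simp only [pvSA, hgin, if_neg hq1]
                      simp only [pvSA, hEq2] at hsa
                      exact hsa
                    exact ih g (Nat.lt_succ_self g) (r0 + d)
                      (pvGroupMap d c :: c0 :: rest) r f' hp1' hp2' hsa'

-- B's dict literal agrees with port A's groupMap function on every group character
theorem pvGmap (d : Int) (ch : Char) (h : (pvOpens d).contains ch = true) :
    ((PySem.Dict.get? (if 0 < d then
        PySem.Dict.ofList [('(', ')'), ('<', '>'), ('[', ']'), ('{', '}')]
      else PySem.Dict.ofList [(')', '('), ('>', '<'), (']', '['), ('}', '{')]) ch).getD ch)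
      = pvGroupMap d ch := by
  by_cases hd : 0 < d
  · have h' : ch = '(' ∨ ch = '<' ∨ ch = '[' ∨ ch = '{' := by
      simp only [pvOpens, if_pos hd] at h
      simp at h; tauto
    rw [if_pos hd]
    unfold pvGroupMap
    rw [if_pos hd]
    rcases h' with rfl | rfl | rfl | rfl <;> decide
  · have h' : ch = ')' ∨ ch = '>' ∨ ch = ']' ∨ ch = '}' := by
      simp only [pvOpens, if_neg hd] at h
      simp at h; tauto
    rw [if_neg hd]
    unfold pvGroupMap
    rw [if_neg hd]
    rcases h' with rfl | rfl | rfl | rfl <;> decide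

-- ===== VERDICT (by name: the statement is the Claim_ definition above) =====
theorem findSkippingGroups_spec : Claim_equal_findSkippingGroups := by
  intro line pos chars direction _ hpre
  obtain ⟨hp1, hp0⟩ := hpre
  unfold Spec_findSkippingGroups findSkippingGroups findSkippingGroups_alt
  have hsl : (PySem.Str.len line : Int) = (line.toList.length : Int) := by
    simp [PySem.Str.len_eq]
  have hll : line.length = line.toList.length := rfl
  by_cases hpos : pos < (line.toList.length : Int)
  · -- the searching case
    have hd : direction ≠ 0 := by
      intro h0
      have := hp0 h0
      omega
    have hfuel : pvLen line.toList direction pos < pvFuel line pos := by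
      have hb := pvLen_le (a := pos) (b := pvE line.toList direction) (s := direction)
      unfold pvLen pvFuel
      rcases lt_or_gt_of_ne hd with hneg | hposd
      · rw [show pvE line.toList direction = -1 by simp [pvE, hneg],
          if_neg (by omega : ¬ (0:Int) < direction)] at hb
        rw [show pvE line.toList direction = -1 by simp [pvE, hneg]]
        omega
      · rw [show pvE line.toList direction = (line.toList.length : Int) by
            simp [pvE]; omega,
          if_pos hposd] at hb
        rw [show pvE line.toList direction = (line.toList.length : Int) by
            simp [pvE]; omega]
        omega
    rcases hres : goA line.toList direction (pvFuel line pos) pos chars.toList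
        with _ | ⟨r, f'⟩
    · exfalso
      have := (pvST line.toList direction hd (pvFuel line pos) pos chars.toList).1 hres
      omega
    · have hmain := pvMain line.toList chars.toList direction hd _
        (fun ch h => pvGmap direction ch h) (pvFuel line pos) pos [] r f'
        hp1 (fun _ => hpos) (by simpa [pvSA] using hres)
      have hEnd : (if 0 < direction then (line.toList.length : Int) else -1) =
          pvE line.toList direction := by
        rcases lt_or_gt_of_ne hd with hneg | hposd
        · simp [pvE, hneg]; omega
        · simp [pvE]; omega
      simp only [if_pos hpos, hEnd]
      exact hmain.symm
  · -- pos beyond the end of the line: both ports return -1 at once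
    obtain ⟨g, hgf⟩ : ∃ g, pvFuel line pos = g + 1 :=
      ⟨line.length + pos.natAbs + 3, by simp [pvFuel]⟩
    have hA : goA line.toList direction (pvFuel line pos) pos chars.toList =
        some (-1, g) := by
      rw [hgf]
      simp only [goA, findNextOccurrence, if_neg hpos, if_true]
    simp only [hA, if_neg hpos]
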